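-- pv_equiv track=rewrite | github.com/jimmy-academia/dev-ADDM | src/addm/tasks/cli/extract.py | _split_by_model_then_size
-- ===== SOURCE A (Python) =====
-- from typing import Any, Dict, List, Optional, Tuple
--
-- def _split_into_batches(items: List[Any], max_size: int) -> List[List[Any]]:
--     """Split list into chunks of max_size."""
--     return [items[i:i + max_size] for i in range(0, len(items), max_size)]
--
-- def _split_by_model_then_size(
--     items: List[Dict[str, Any]], max_size: int
-- ) -> List[Tuple[str, List[Dict[str, Any]]]]:
--     """
--     Split batch items by model first, then by size.
--
--     OpenAI Batch API requires each batch to contain only one model.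
--
--     Args:
--         items: List of batch request items (each has 'body' with 'model')
--         max_size: Maximum items per batch
--
--     Returns:
--         List of (model, items) tuples, where each items list is <= max_size
--     """
--     from collections import defaultdict
--
--     # Group by model
--     by_model: Dict[str, List[Dict[str, Any]]] = defaultdict(list)
--     for item in items:
--         model = item.get("body", {}).get("model", "unknown")
--         by_model[model].append(item)
--
--     # Split each model's items by size
--     result: List[Tuple[str, List[Dict[str, Any]]]] = []
--     for model in sorted(by_model.keys()):
--         model_items = by_model[model]
--         chunks = _split_into_batches(model_items, max_size)
--         for chunk in chunks:
--             result.append((model, chunk))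
--
--     return result
-- ===== SOURCE B (Python) =====
-- def _split_by_model_then_size(items, max_size):
--     """Alternative: no dict bucketing — sort the distinct model names, then
--     take each model's items by a filter scan and slice them into chunks."""
--     def key(it):
--         return it.get("body", {}).get("model", "unknown")
--
--     result = []
--     for model in sorted({key(it) for it in items}):
--         group = [it for it in items if key(it) == model]
--         for i in range(0, len(group), max_size):
--             result.append((model, group[i:i + max_size]))
--     return result
-- ===== Notes on version B (the rewrite author's own statement) =====
-- stated objective: alternative
-- what changed: Replaces the defaultdict bucketing pass with sorting the distinct model keys and extracting each model's items by a filter scan over the input, chunking inline; no dict and no helper function.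
import Mathlib
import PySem

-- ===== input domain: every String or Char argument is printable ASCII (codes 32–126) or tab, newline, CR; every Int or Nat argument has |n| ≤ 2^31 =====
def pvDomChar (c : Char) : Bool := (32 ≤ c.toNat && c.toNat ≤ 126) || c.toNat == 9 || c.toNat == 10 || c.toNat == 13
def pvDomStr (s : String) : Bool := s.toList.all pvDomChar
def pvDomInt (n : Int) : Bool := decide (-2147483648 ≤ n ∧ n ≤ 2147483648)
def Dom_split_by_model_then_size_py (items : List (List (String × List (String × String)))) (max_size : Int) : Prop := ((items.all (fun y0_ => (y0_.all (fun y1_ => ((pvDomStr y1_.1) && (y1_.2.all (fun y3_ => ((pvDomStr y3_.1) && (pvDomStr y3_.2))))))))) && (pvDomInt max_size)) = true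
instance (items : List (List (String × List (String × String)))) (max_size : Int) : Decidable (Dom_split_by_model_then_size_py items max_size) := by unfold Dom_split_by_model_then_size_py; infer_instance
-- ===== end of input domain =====

-- B replaces A's defaultdict bucketing with sorted distinct keys + a filter scan per model
-- (alternative decomposition, not claimed faster).

-- ===== PORT A =====
-- item.get("body", {}).get("model", "unknown")
def pvKeyOf (it : List (String × List (String × String))) : String :=
  (PySem.Dict.mk ((PySem.Dict.mk it).getD "body" [])).getD "model" "unknown"

-- _split_into_batches: [items[i:i + max_size] for i in range(0, len(items), max_size)]
def pvSplitIntoBatches (xs : List (List (String × List (String × String)))) (max_size : Int) :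
    List (List (List (String × List (String × String)))) :=
  (PySem.List.pyRange 0 xs.length max_size).map
    (fun i => PySem.List.slice xs (some i) (some (i + max_size)))

def split_by_model_then_size_py (items : List (List (String × List (String × String)))) (max_size : Int) : List (String × (List (List (String × List (String × String))))) :=
  let by_model : PySem.Dict String (List (List (String × List (String × String)))) :=
    items.foldl (fun d it => d.modify (pvKeyOf it) [] (fun l => l ++ [it])) PySem.Dict.empty
  (PySem.List.sorted by_model.keys (fun k => k) false).foldl
    (fun res m =>
      (pvSplitIntoBatches (by_model.getD m []) max_size).foldl
        (fun r chunk => r ++ [(m, chunk)]) res) []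

-- ===== PORT B =====
def split_by_model_then_size_py_alt (items : List (List (String × List (String × String)))) (max_size : Int) : List (String × (List (List (String × List (String × String))))) :=
  (PySem.List.sorted (PySem.Set.ofList (items.map pvKeyOf)) (fun k => k) false).foldl
    (fun res m =>
      (PySem.List.pyRange 0 (items.filter (fun it => pvKeyOf it == m)).length max_size).foldl
        (fun r i => r ++ [(m, PySem.List.slice (items.filter (fun it => pvKeyOf it == m)) (some i) (some (i + max_size)))]) res) []

-- ===== PRECONDITION & SPEC =====
-- Pre_ excludes max_size = 0 with nonempty items: there Python's range(0, n, 0) raises ValueError in both A and B.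
def Pre_split_by_model_then_size_py (items : List (List (String × List (String × String)))) (max_size : Int) : Prop :=
  items = [] ∨ max_size ≠ 0
instance (items : List (List (String × List (String × String)))) (max_size : Int) : Decidable (Pre_split_by_model_then_size_py items max_size) := by unfold Pre_split_by_model_then_size_py; infer_instance

def pvWitness_split_by_model_then_size_py : (List (List (String × List (String × String)))) × Int :=
  ([[("body", [("model", "a")])]], 1)

def Spec_split_by_model_then_size_py (items : List (List (String × List (String × String)))) (max_size : Int) (out : List (String × (List (List (String × List (String × String)))))) : Prop := out = split_by_model_then_size_py_alt items max_size
instance (items : List (List (String × List (String × String)))) (max_size : Int) (out : List (String × (List (List (String × List (String × String)))))) : Decidable (Spec_split_by_model_then_size_py items max_size out) := by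
  unfold Spec_split_by_model_then_size_py
  exact @instDecidableEqList _ (@instDecidableEqProd _ _ _ (@instDecidableEqList _ (by infer_instance))) _ _

-- ===== CLAIM (what is proved, stated in full; the proofs are below) =====
def Claim_equal_split_by_model_then_size_py : Prop := ∀ (items : List (List (String × List (String × String)))) (max_size : Int), Dom_split_by_model_then_size_py items max_size → Pre_split_by_model_then_size_py items max_size → Spec_split_by_model_then_size_py items max_size (split_by_model_then_size_py items max_size)

-- ===== LEMMAS AND PROOFS =====

-- A's bucket for model m is exactly the filter B scans for.
theorem pv_bucket_getD (items : List (List (String × List (String × String)))) (m : String) :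
    (items.foldl (fun d it => d.modify (pvKeyOf it) [] (fun l => l ++ [it])) PySem.Dict.empty).getD m []
      = items.filter (fun it => pvKeyOf it == m) := by
  have h := PySem.Dict.getD_foldl_modify_append
    (l := items.map (fun it => (pvKeyOf it, it))) (d := PySem.Dict.empty) (c := m)
  simp only [List.foldl_map] at h
  simp only [List.filter_map, List.map_map] at h
  simpa [Function.comp_def] using h

-- A's key set is the ordered-distinct list of keys B builds.
theorem pv_bucket_keys (items : List (List (String × List (String × String)))) :
    (items.foldl (fun d it => d.modify (pvKeyOf it) [] (fun l => l ++ [it])) PySem.Dict.empty).keys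
      = PySem.Set.ofList (items.map pvKeyOf) := by
  have h := PySem.Dict.keys_foldl_modify_key (l := items) (key := pvKeyOf)
    (d0 := ([] : List (List (String × List (String × String)))))
    (f := fun (_ : PySem.Dict String (List (List (String × List (String × String)))))
            (it : List (String × List (String × String))) => (fun l => l ++ [it]))
    (d := PySem.Dict.empty)
  simpa [PySem.Set.update_nil_left] using h

theorem split_by_model_then_size_py_eq (items : List (List (String × List (String × String)))) (max_size : Int) :
    split_by_model_then_size_py items max_size = split_by_model_then_size_py_alt items max_size := by
  unfold split_by_model_then_size_py split_by_model_then_size_py_alt pvSplitIntoBatches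
  simp only [pv_bucket_keys, pv_bucket_getD, List.foldl_map]

-- ===== VERDICT (by name: the statement is the Claim_ definition above) =====
theorem split_by_model_then_size_py_spec : Claim_equal_split_by_model_then_size_py := by
  intro items max_size _ _
  exact split_by_model_then_size_py_eq items max_size
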